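-- pv_equiv track=rewrite | github.com/inkoff/algorithms-templates | python/sprint1_nonfinals/game.py | trainer
-- ===== SOURCE A (Python) =====
-- def trainer(finger: int, matrix: str) -> int:
--     numbers = {}
--     scores = 0
--     for number in matrix:
--         if number != '.':
--             if number not in numbers:
--                 numbers[number] = 0
--             numbers[number] = numbers.get(number, 0) + 1
--     for i in numbers.values():
--         if 0 < i <= 2 * finger:
--             scores += 1
--     return scores
-- ===== SOURCE B (Python) =====
-- def trainer(finger: int, matrix: str) -> int:
--     # sort the non-dot characters so equal keys are adjacent, then scan runs
--     keys = sorted(c for c in matrix if c != '.')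
--     scores = 0
--     while keys:
--         c = keys[0]
--         k = 1
--         while k < len(keys) and keys[k] == c:
--             k += 1
--         if 0 < k <= 2 * finger:
--             scores += 1
--         keys = keys[k:]
--     return scores
-- ===== Notes on version B (the rewrite author's own statement) =====
-- stated objective: alternative
-- what changed: B replaces A's hash-map frequency accumulation and subsequent pass over dict values by sort-then-scan: it sorts the non-'.' characters and counts qualifying runs in one scan over the sorted sequence, with no dictionary at all.
import Mathlib
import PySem

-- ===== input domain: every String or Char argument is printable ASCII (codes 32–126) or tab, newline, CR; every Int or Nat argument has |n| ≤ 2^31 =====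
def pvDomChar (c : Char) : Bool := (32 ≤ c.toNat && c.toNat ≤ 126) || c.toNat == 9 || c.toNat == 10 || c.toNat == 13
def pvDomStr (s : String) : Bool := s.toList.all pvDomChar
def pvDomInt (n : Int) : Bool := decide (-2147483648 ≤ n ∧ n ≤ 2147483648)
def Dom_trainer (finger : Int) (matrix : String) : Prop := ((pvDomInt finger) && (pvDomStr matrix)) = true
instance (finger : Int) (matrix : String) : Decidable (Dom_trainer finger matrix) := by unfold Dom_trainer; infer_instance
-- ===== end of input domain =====

-- B replaces A's dict-based frequency accumulation by sort-then-scan over runs (alternative algorithm, same result).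

-- ===== PORT A =====
-- the body of A's first for-loop
def trainerStep (numbers : PySem.Dict Char Int) (number : Char) : PySem.Dict Char Int :=
  if number ≠ '.' then
    let numbers := if ¬ numbers.contains number then numbers.insert number 0 else numbers
    numbers.insert number (numbers.getD number 0 + 1)
  else numbers

def trainer (finger : Int) (matrix : String) : Int :=
  let numbers : PySem.Dict Char Int := matrix.toList.foldl trainerStep PySem.Dict.empty
  numbers.values.foldl (fun scores i => if 0 < i ∧ i ≤ 2 * finger then scores + 1 else scores) 0

-- ===== PORT B =====
-- the outer 'while keys' loop; the inner while computing k is the takeWhile length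
def trainerRuns (finger : Int) (keys : List Char) : Int :=
  match h : keys with
  | [] => 0
  | c :: rest =>
      let k : Int := 1 + (rest.takeWhile (fun x => x == c)).length
      (if 0 < k ∧ k ≤ 2 * finger then 1 else 0) + trainerRuns finger (rest.dropWhile (fun x => x == c))
termination_by keys.length
decreasing_by
  simp only [List.length_cons]
  exact Nat.lt_succ_of_le (List.length_dropWhile_le _ _)

def trainer_alt (finger : Int) (matrix : String) : Int :=
  trainerRuns finger (PySem.List.sorted (matrix.toList.filter (fun c => c ≠ '.')) (fun x => x) false)

-- ===== PRECONDITION & SPEC =====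
def Spec_trainer (finger : Int) (matrix : String) (out : Int) : Prop := out = trainer_alt finger matrix
instance (finger : Int) (matrix : String) (out : Int) : Decidable (Spec_trainer finger matrix out) := by unfold Spec_trainer; infer_instance

-- ===== CLAIM (what is proved, stated in full; the proofs are below) =====
def Claim_equal_trainer : Prop := ∀ (finger : Int) (matrix : String), Dom_trainer finger matrix → Spec_trainer finger matrix (trainer finger matrix)

-- ===== LEMMAS AND PROOFS =====

-- the predicate both programs test on a character's frequency (count taken in list l)
def pvGood (finger : Int) (l : List Char) (c : Char) : Bool :=
  decide (0 < (l.count c : Int) ∧ (l.count c : Int) ≤ 2 * finger)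

-- for a sorted tail: once the run of c's is dropped, c never reappears
lemma notmem_dropWhile_le (c : Char) (rest : List Char)
    (hp : rest.Pairwise (fun a b => a ≤ b)) (hc : ∀ x ∈ rest, c ≤ x) :
    c ∉ rest.dropWhile (fun x => x == c) := by
  induction rest with
  | nil => simp
  | cons x rs ih =>
    rw [List.pairwise_cons] at hp
    by_cases hx : x = c
    · subst hx
      rw [List.dropWhile_cons_of_pos (by simp)]
      exact ih hp.2 (fun y hy => hc y (List.mem_cons_of_mem _ hy))
    · rw [List.dropWhile_cons_of_neg (by simpa using hx)]
      intro hmem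
      rcases List.mem_cons.mp hmem with h | h
      · exact hx h.symm
      · exact hx (le_antisymm (hp.1 c h) (hc x List.mem_cons_self))

-- A's dict-building step is the plain counting insert
lemma step_eq (d : PySem.Dict Char Int) (x : Char) :
    (let d' := if ¬ d.contains x then d.insert x 0 else d
     d'.insert x (d'.getD x 0 + 1)) = d.insert x (d.getD x 0 + 1) := by
  by_cases h : d.contains x
  · simp [h]
  · have h0 : d.getD x 0 = 0 := PySem.Dict.getD_of_not_contains d 0 (by simpa using h)
    simp only [h, Bool.not_eq_true, if_pos]
    rw [PySem.Dict.getD_insert_self, PySem.Dict.insert_insert_self, h0]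

-- A computes the countP of pvGood over the deduped filtered characters
lemma trainer_eq_countP (finger : Int) (matrix : String) :
    trainer finger matrix =
      ((PySem.List.dedup (matrix.toList.filter (fun c => c ≠ '.'))).countP
        (pvGood finger (matrix.toList.filter (fun c => c ≠ '.'))) : Int) := by
  have hstep : trainerStep = fun d x => if x ≠ '.' then d.insert x (d.getD x 0 + 1) else d := by
    funext d x
    unfold trainerStep
    by_cases hx : x ≠ '.'
    · rw [if_pos hx, if_pos hx]
      exact step_eq d x
    · simp [hx]
  set fl := matrix.toList.filter (fun c => c ≠ '.') with hfl
  have hdict : matrix.toList.foldl trainerStep PySem.Dict.empty = PySem.Dict.counter fl := by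
    rw [hstep, PySem.List.foldl_ite_eq_foldl_filter,
        PySem.Dict.foldl_insert_getD_add_one_eq_counter]
  have hv : (PySem.Dict.counter fl).values
      = (PySem.List.dedup fl).map (fun k => (fl.count k : Int)) := by
    show (PySem.Dict.counter fl).items.map (·.2) = _
    rw [PySem.Dict.items_counter, List.map_map, PySem.List.dedup_eq_ofList]
    rfl
  unfold trainer
  rw [hdict]
  show (PySem.Dict.counter fl).values.foldl
      (fun scores i => if 0 < i ∧ i ≤ 2 * finger then scores + 1 else scores) 0 = _
  rw [hv, PySem.List.foldl_ite_add_one, List.countP_map]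
  rw [PySem.List.dedup_eq_ofList]
  norm_num
  apply List.countP_congr
  intro x _
  simp [pvGood]

-- B on a ≤-sorted list computes the same countP (over that list)
lemma trainerRuns_eq_countP (finger : Int) (l : List Char)
    (hs : l.Pairwise (fun a b => a ≤ b)) :
    trainerRuns finger l = ((PySem.List.dedup l).countP (pvGood finger l) : Int) := by
  induction hn : l.length using Nat.strong_induction_on generalizing l with
  | _ n ih =>
    match l, hs with
    | [], _ => simp [trainerRuns, PySem.List.dedup]
    | c :: rest, hs =>
      rw [List.pairwise_cons] at hs
      obtain ⟨hc, hrest⟩ := hs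
      set w := rest.takeWhile (fun x => x == c) with hw
      set t := rest.dropWhile (fun x => x == c) with ht
      have hwt : w ++ t = rest := List.takeWhile_append_dropWhile
      have hwc : ∀ x ∈ w, x = c := by
        intro x hx
        have := List.mem_takeWhile_imp hx
        simpa using this
      have hct : c ∉ t := notmem_dropWhile_le c rest hrest hc
      have htsub : t.Sublist rest := (List.dropWhile_suffix _).sublist
      have htp : t.Pairwise (fun a b => a ≤ b) := hrest.sublist htsub
      have hlen : t.length < n := by
        rw [← hn]
        simp only [List.length_cons]
        exact Nat.lt_succ_of_le (List.length_dropWhile_le _ _)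
      have hIH := ih t.length hlen t htp rfl
      -- counts in l versus counts in t
      have hcount_c : (c :: rest).count c = 1 + w.length := by
        rw [← hwt, List.count_cons_self, List.count_append]
        rw [List.count_eq_length.mpr (by intro x hx; exact ((hwc x hx) ▸ rfl)),
            List.count_eq_zero.mpr hct]
        omega
      have hcount_ne : ∀ x, x ≠ c → (c :: rest).count x = t.count x := by
        intro x hx
        have h1 : w.count x = 0 := List.count_eq_zero.mpr (fun hmem => hx (hwc x hmem))
        rw [← hwt]
        have hcx : ¬ c = x := fun h => hx (Eq.symm h)
        simp [List.count_append, h1, hcx]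
      -- dedup (c :: rest) is a permutation of c :: dedup t
      have hmem_l : ∀ a, a ∈ c :: rest ↔ a = c ∨ a ∈ t := by
        intro a
        constructor
        · intro ha
          rcases List.mem_cons.mp ha with h | h
          · exact Or.inl h
          · rw [← hwt] at h
            rcases List.mem_append.mp h with h | h
            · exact Or.inl (hwc a h)
            · exact Or.inr h
        · rintro (rfl | h)
          · exact List.mem_cons_self
          · exact List.mem_cons_of_mem _ (htsub.mem h)
      have hperm : (PySem.List.dedup (c :: rest)).Perm (c :: PySem.List.dedup t) := by
        apply (List.perm_ext_iff_of_nodup (PySem.List.nodup_dedup _) ?_).mpr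
        · intro a
          simp only [PySem.List.mem_dedup, List.mem_cons, hmem_l]
        · exact List.nodup_cons.mpr ⟨by simpa [PySem.List.mem_dedup] using hct,
            PySem.List.nodup_dedup _⟩
      rw [trainerRuns]
      rw [hIH, hperm.countP_eq, List.countP_cons]
      have hgoodt : (PySem.List.dedup t).countP (pvGood finger t)
          = (PySem.List.dedup t).countP (pvGood finger (c :: rest)) := by
        apply List.countP_congr
        intro x hx
        have hxt : x ∈ t := (PySem.List.mem_dedup _ _).mp hx
        have hxc : x ≠ c := fun h => hct (h ▸ hxt)
        simp [pvGood, hcount_ne x hxc]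
      have hgoodc : pvGood finger (c :: rest) c
          = decide ((1 + (w.length : Int)) ≤ 2 * finger) := by
        simp only [pvGood, hcount_c]
        have : (0 : Int) < ((1 + w.length : Nat) : Int) := by positivity
        push_cast
        push_cast at this
        simp [this]
      rw [hgoodt, hgoodc]
      by_cases hle : (1 : Int) + (w.length : Int) ≤ 2 * finger
      · have h0 : (0:Int) < 1 + (w.length : Int) := by positivity
        simp only [← hw, hle, h0, and_self, if_pos, decide_true]
        push_cast
        ring
      · simp only [← hw]
        rw [if_neg (by push_cast; exact fun h => hle h.2), if_neg (by simpa using hle)]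
        ring

-- ===== VERDICT (by name: the statement is the Claim_ definition above) =====
theorem trainer_spec : Claim_equal_trainer := by
  intro finger matrix _
  unfold Spec_trainer trainer_alt
  set fl := matrix.toList.filter (fun c => c ≠ '.') with hfl
  set sl := PySem.List.sorted fl (fun x => x) false with hsl
  have hperm : sl.Perm fl := PySem.List.sorted_perm fl (fun x => x) false
  rw [trainer_eq_countP, trainerRuns_eq_countP finger sl
        (by simpa using PySem.List.sorted_pairwise fl (fun x => x))]
  have hmem : ∀ a, a ∈ PySem.List.dedup fl ↔ a ∈ PySem.List.dedup sl := by
    intro a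
    simp [hperm.mem_iff]
  have hp : (PySem.List.dedup fl).Perm (PySem.List.dedup sl) :=
    (List.perm_ext_iff_of_nodup (PySem.List.nodup_dedup fl) (PySem.List.nodup_dedup sl)).mpr hmem
  have hcount : ∀ c, sl.count c = fl.count c := fun c => hperm.count_eq c
  have : (PySem.List.dedup sl).countP (pvGood finger sl)
       = (PySem.List.dedup sl).countP (pvGood finger fl) := by
    apply List.countP_congr
    intro c _
    simp [pvGood, hcount]
  rw [this, hp.countP_eq]
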